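-- pv_equiv track=rewrite | github.com/M-Nisar-07/kimase_site_crosstalk | utils_diff.py | get_ndu
-- ===== SOURCE A (Python) =====
-- def remove_dup(list_of_dicts):
--     unique_dicts_set = {frozenset(d.items()) for d in list_of_dicts}
--     unique_dicts = [dict(s) for s in unique_dicts_set]
--     return unique_dicts
--
-- def get_ndu(s1,s2):
--     list_of_dicts = []
--
--     for s1s in s1:
--         c1,e1 = next(iter(s1s.items()))
--         if (e1 == "down-regulated"):
--             list_of_dicts.append(s1s)
--
--
--     for s2s in s2:
--         c2,e2 = next(iter(s2s.items()))
--         if (e2 == "Up-regulated"):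
--             list_of_dicts.append(s2s)
--
--     return (len(remove_dup(list_of_dicts)))
-- ===== SOURCE B (Python) =====
-- def get_ndu(s1, s2):
--     keys = [tuple(sorted(d.items())) for d in s1 if next(iter(d.items()))[1] == "down-regulated"]
--     keys += [tuple(sorted(d.items())) for d in s2 if next(iter(d.items()))[1] == "Up-regulated"]
--     keys.sort()
--     return sum(1 for i, k in enumerate(keys) if i == 0 or k != keys[i - 1])
-- ===== Notes on version B (the rewrite author's own statement) =====
-- stated objective: alternative
-- what changed: B replaces A's hash-based dedup (set of frozensets plus dict-rebuild helper) by sort-then-scan: it canonicalises each matching dict to a sorted item tuple, sorts the list of tuples, and counts group boundaries by comparing each element with its predecessor.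
import Mathlib
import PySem

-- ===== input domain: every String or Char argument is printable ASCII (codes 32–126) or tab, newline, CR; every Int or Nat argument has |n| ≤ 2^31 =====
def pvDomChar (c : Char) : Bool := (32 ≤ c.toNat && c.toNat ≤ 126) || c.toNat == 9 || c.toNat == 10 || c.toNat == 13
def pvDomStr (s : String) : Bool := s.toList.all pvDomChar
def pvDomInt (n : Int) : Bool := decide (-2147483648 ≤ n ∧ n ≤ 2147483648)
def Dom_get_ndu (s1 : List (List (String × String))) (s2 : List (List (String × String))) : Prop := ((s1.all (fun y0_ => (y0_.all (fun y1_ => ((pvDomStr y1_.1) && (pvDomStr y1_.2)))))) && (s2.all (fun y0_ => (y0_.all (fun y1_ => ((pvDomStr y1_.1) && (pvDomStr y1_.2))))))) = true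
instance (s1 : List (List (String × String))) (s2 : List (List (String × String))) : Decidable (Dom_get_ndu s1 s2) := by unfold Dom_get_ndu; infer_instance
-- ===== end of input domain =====

-- B counts the distinct filtered dicts by sort-then-scan — sort the canonical item tuples and count
-- group boundaries — instead of A's append-loops + frozenset hash-set + dict-rebuild (objective: alternative).

-- ===== PORT A =====
-- each inner Python dict arrives as an association list; its actual items (overwrite semantics) are:
def pvItems (d : List (String × String)) : List (String × String) := (PySem.Dict.ofList d).items

-- e1 = next(iter(d.items()))[1]; total form, only used under Pre_ (d nonempty)
def pvFirstVal (d : List (String × String)) : String := ((pvItems d).headD ("", "")).2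

-- frozenset(d.items())
def pvFrozen (d : List (String × String)) : PySem.Set (String × String) := PySem.Set.ofList (pvItems d)

-- remove_dup: {frozenset(d.items()) for d in lod}; set membership is frozenset (extensional) equality.
-- The final [dict(s) for s in set] rebuild does not change the length, which is all A uses.
def pvRemoveDupLen (lod : List (List (String × String))) : Nat :=
  (lod.foldl (fun s d => if s.any (fun t => PySem.Set.equal t (pvFrozen d)) then s else s ++ [pvFrozen d]) []).length

def get_ndu (s1 : List (List (String × String))) (s2 : List (List (String × String))) : Int :=
  let lod := s1.foldl (fun acc d => if pvFirstVal d == "down-regulated" then acc ++ [d] else acc) []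
  let lod := s2.foldl (fun acc d => if pvFirstVal d == "Up-regulated" then acc ++ [d] else acc) lod
  (pvRemoveDupLen lod : Int)

-- ===== PORT B =====
-- tuple(sorted(d.items())): Python sorts the (key, value) string pairs lexicographically; the pair
-- comparison is encoded by the sort key p ↦ [p.1.toList, p.2.toList] (tuple order = lexicographic list
-- order, and Python's code-point string order is Lean's order on List Char); instances pinned to the
-- kernel-reducible LinearOrder on List (List Char)
def pvKey (d : List (String × String)) : List (String × String) :=
  @PySem.List.sorted _ _ List.instLinearOrder.toLT LinearOrder.toDecidableLT
    (pvItems d) (fun p => [p.1.toList, p.2.toList]) false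

-- keys.sort(): Python compares the key tuples lexicographically, elementwise on the (str, str) pairs;
-- encoded by the injective key l ↦ l.map (fun p => [p.1.toList, p.2.toList]) under the lexicographic
-- order on List (List (List Char))
def pvTupKey (l : List (String × String)) : List (List (List Char)) :=
  l.map (fun p => [p.1.toList, p.2.toList])

-- sum(1 for i, k in enumerate(keys) if i == 0 or k != keys[i-1]): scan carrying the previous element
def pvCountNew : List (List (String × String)) → Option (List (String × String)) → Nat
  | [], _ => 0
  | k :: ks, prev => (if prev = some k then 0 else 1) + pvCountNew ks (some k)

def get_ndu_alt (s1 : List (List (String × String))) (s2 : List (List (String × String))) : Int :=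
  let keys := (s1.filter (fun d => pvFirstVal d == "down-regulated")).map pvKey
              ++ (s2.filter (fun d => pvFirstVal d == "Up-regulated")).map pvKey
  let sk := @PySem.List.sorted _ _ List.instLinearOrder.toLT LinearOrder.toDecidableLT
              keys pvTupKey false
  (pvCountNew sk none : Int)

-- ===== PRECONDITION & SPEC =====
-- Pre_ excludes inputs containing an empty dict: there A raises StopIteration (next(iter({}.items()))), as does B.
def Pre_get_ndu (s1 : List (List (String × String))) (s2 : List (List (String × String))) : Prop :=
  (s1.all (fun d => !d.isEmpty) && s2.all (fun d => !d.isEmpty)) = true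
instance (s1 : List (List (String × String))) (s2 : List (List (String × String))) : Decidable (Pre_get_ndu s1 s2) := by unfold Pre_get_ndu; infer_instance

def pvWitness_get_ndu : (List (List (String × String))) × (List (List (String × String))) :=
  ([[("g1", "down-regulated")], [("g2", "up")]], [[("g1", "Up-regulated"), ("note", "x")]])

def Spec_get_ndu (s1 : List (List (String × String))) (s2 : List (List (String × String))) (out : Int) : Prop := out = get_ndu_alt s1 s2
instance (s1 : List (List (String × String))) (s2 : List (List (String × String))) (out : Int) : Decidable (Spec_get_ndu s1 s2 out) := by unfold Spec_get_ndu; infer_instance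

-- ===== CLAIM (what is proved, stated in full; the proofs are below) =====
def Claim_equal_get_ndu : Prop := ∀ (s1 : List (List (String × String))) (s2 : List (List (String × String))), Dom_get_ndu s1 s2 → Pre_get_ndu s1 s2 → Spec_get_ndu s1 s2 (get_ndu s1 s2)

-- ===== LEMMAS AND PROOFS =====

-- the items of a dict are pairwise distinct (their keys already are)
lemma pvItems_nodup (d : List (String × String)) : (pvItems d).Nodup := by
  have h := PySem.Dict.nodup_keys_ofList (κ := String) (ν := String) d
  have hk : ((PySem.Dict.ofList d).items.map (·.1)).Nodup := h
  exact hk.of_map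

lemma pvKeyFun_injective : Function.Injective (fun p : String × String => [p.1.toList, p.2.toList]) := by
  intro a b h
  simp only [List.cons.injEq, and_true] at h
  exact Prod.ext (String.toList_inj.mp h.1) (String.toList_inj.mp h.2)

-- frozenset equality on items ↔ equality of the canonical sorted keys
lemma pvBridge (a b : List (String × String)) :
    PySem.Set.equal (pvFrozen a) (pvFrozen b) = (pvKey a == pvKey b) := by
  have ha := pvItems_nodup a
  have hb := pvItems_nodup b
  have hfa : pvFrozen a = pvItems a := PySem.Set.ofList_eq_self_of_nodup _ ha
  have hfb : pvFrozen b = pvItems b := PySem.Set.ofList_eq_self_of_nodup _ hb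
  rw [hfa, hfb]
  have hperm : (PySem.Set.equal (pvItems a) (pvItems b) = true) ↔ (pvItems a).Perm (pvItems b) := by
    rw [PySem.Set.equal_iff, ← List.perm_ext_iff_of_nodup ha hb]
  have p1 : (pvKey a).Perm (pvItems a) :=
    @PySem.List.sorted_perm _ _ List.instLinearOrder.toLT LinearOrder.toDecidableLT (pvItems a) _ false
  have p2 : (pvKey b).Perm (pvItems b) :=
    @PySem.List.sorted_perm _ _ List.instLinearOrder.toLT LinearOrder.toDecidableLT (pvItems b) _ false
  have hkey : pvKey a = pvKey b ↔ (pvItems a).Perm (pvItems b) := by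
    constructor
    · intro h
      rw [h] at p1
      exact p1.symm.trans p2
    · intro h
      have hnd : (pvKey a).Nodup := p1.nodup_iff.mpr ha
      have hle : List.Pairwise
          (fun x y : String × String => (fun p : String × String => [p.1.toList, p.2.toList]) x ≤ (fun p : String × String => [p.1.toList, p.2.toList]) y) (pvKey a) :=
        PySem.List.sorted_pairwise (pvItems a) (fun p => [p.1.toList, p.2.toList])
      have hne : List.Pairwise (fun x y : String × String => x ≠ y) (pvKey a) := hnd
      have hstrict : List.Pairwise
          (fun x y : String × String => (fun p : String × String => [p.1.toList, p.2.toList]) x < (fun p : String × String => [p.1.toList, p.2.toList]) y) (pvKey a) :=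
        (hle.and hne).imp (fun hxy => lt_of_le_of_ne hxy.1 (fun he => hxy.2 (pvKeyFun_injective he)))
      exact (PySem.List.sorted_eq_of_perm_of_pairwise_lt (pvItems b) (pvKey a)
        (fun p => [p.1.toList, p.2.toList]) (p1.trans h) hstrict).symm
  by_cases h : pvKey a = pvKey b
  · rw [hperm.mpr (hkey.mp h)]
    simp [h]
  · have hf : PySem.Set.equal (pvItems a) (pvItems b) = false := by
      rcases Bool.eq_false_or_eq_true (PySem.Set.equal (pvItems a) (pvItems b)) with hff | htt
      · exact absurd (hkey.mpr (hperm.mp hff)) h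
      · exact htt
    rw [hf]
    exact (beq_eq_false_iff_ne.mpr h).symm

-- the A-side dedup fold grows in lock-step with the distinct canonical keys seen so far
lemma pvCore (L : List (List (String × String))) :
    ∀ (R : List (List (String × String))),
    (L.foldl (fun s d => if s.any (fun t => PySem.Set.equal t (pvFrozen d)) then s else s ++ [pvFrozen d]) (R.map pvFrozen)).length
      = (PySem.Set.update (R.map pvKey) (L.map pvKey)).length := by
  induction L with
  | nil =>
    intro R
    show (R.map pvFrozen).length = (R.map pvKey).length
    simp
  | cons d L ih =>
    intro R
    have hany : (R.map pvFrozen).any (fun t => PySem.Set.equal t (pvFrozen d))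
        = (R.map pvKey).contains (pvKey d) := by
      simp only [List.any_map, Function.comp_def, pvBridge]
      simp [List.any_eq, beq_iff_eq]
    simp only [List.foldl_cons, List.map_cons, PySem.Set.update_cons, PySem.Set.add]
    rw [hany]
    simp only [PySem.Set.contains_eq_listContains]
    by_cases hc : (R.map pvKey).contains (pvKey d) = true
    · simp only [hc, if_true]
      exact ih R
    · simp only [Bool.not_eq_true] at hc
      simp only [hc, Bool.false_eq_true, if_false]
      have := ih (R ++ [d])
      simpa [List.map_append] using this

lemma pvSel_eq (p : List (String × String) → Bool) (l : List (List (String × String)))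
    (acc : List (List (String × String))) :
    l.foldl (fun acc d => if p d then acc ++ [d] else acc) acc = acc ++ l.filter p := by
  simpa using PySem.List.foldl_append_if p id l acc

lemma pvTupKey_injective : Function.Injective pvTupKey :=
  List.map_injective_iff.mpr pvKeyFun_injective

-- the distinct count of a set-as-list equals the Finset cardinality of the underlying list
lemma pvOfListLen (l : List (List (String × String))) :
    (PySem.Set.ofList l : List (List (String × String))).length = l.toFinset.card := by
  have hnd : (PySem.Set.ofList l : List (List (String × String))).Nodup := PySem.Set.nodup_ofList l
  have hfs : (PySem.Set.ofList l : List (List (String × String))).toFinset = l.toFinset := by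
    apply Finset.ext
    intro x
    simp [List.mem_toFinset, PySem.Set.mem_ofList]
  rw [← List.toFinset_card_of_nodup hnd, hfs]

-- the boundary scan over a sorted tail, seeded with the (minimal) head, counts the distinct elements
lemma pvScan (t : List (List (String × String))) :
    ∀ a : List (String × String),
    (a :: t).Pairwise (fun x y => pvTupKey x ≤ pvTupKey y) →
    pvCountNew t (some a) + 1 = (a :: t).toFinset.card := by
  induction t with
  | nil =>
    intro a _
    simp [pvCountNew]
  | cons b t' ih =>
    intro a hp
    have hp' : (b :: t').Pairwise (fun x y => pvTupKey x ≤ pvTupKey y) := hp.of_cons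
    have hIH := ih b hp'
    by_cases hab : a = b
    · subst hab
      have hstep : pvCountNew (a :: t') (some a) = pvCountNew t' (some a) := by
        simp [pvCountNew]
      rw [hstep, hIH]
      simp [List.toFinset_cons]
    · have hnm : a ∉ b :: t' := by
        intro hmem
        have hle : pvTupKey a ≤ pvTupKey b := (List.pairwise_cons.mp hp).1 b (by simp)
        have hge : pvTupKey b ≤ pvTupKey a := by
          rcases List.mem_cons.mp hmem with h1 | h2
          · exact le_of_eq (by rw [h1])
          · exact (List.pairwise_cons.mp hp').1 a h2
        exact hab (pvTupKey_injective (le_antisymm hle hge))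
      have hstep : pvCountNew (b :: t') (some a) = 1 + pvCountNew t' (some b) := by
        simp [pvCountNew, hab]
      have hcard : ((a :: b :: t').toFinset).card = ((b :: t').toFinset).card + 1 := by
        simp only [List.toFinset_cons (a := a)]
        rw [Finset.card_insert_of_notMem (by simpa [List.mem_toFinset] using hnm)]
      omega

-- the full boundary scan of a sorted list counts its distinct elements
lemma pvScanAll (M : List (List (String × String)))
    (hs : M.Pairwise (fun x y => pvTupKey x ≤ pvTupKey y)) :
    pvCountNew M none = M.toFinset.card := by
  cases M with
  | nil => simp [pvCountNew]
  | cons a t =>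
    have hstep : pvCountNew (a :: t) none = 1 + pvCountNew t (some a) := by
      simp [pvCountNew]
    have := pvScan t a hs
    omega

-- ===== VERDICT (by name: the statement is the Claim_ definition above) =====
theorem get_ndu_spec : Claim_equal_get_ndu := by
  intro s1 s2 _ _
  show get_ndu s1 s2 = get_ndu_alt s1 s2
  unfold get_ndu get_ndu_alt pvRemoveDupLen
  simp only [pvSel_eq, List.nil_append]
  have hA := pvCore (s1.filter (fun d => pvFirstVal d == "down-regulated")
                    ++ s2.filter (fun d => pvFirstVal d == "Up-regulated")) []
  simp only [List.map_nil] at hA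
  rw [hA, PySem.Set.update_nil_left, List.map_append]
  set keys := (s1.filter (fun d => pvFirstVal d == "down-regulated")).map pvKey
              ++ (s2.filter (fun d => pvFirstVal d == "Up-regulated")).map pvKey with hkeys
  set sk := @PySem.List.sorted _ _ List.instLinearOrder.toLT LinearOrder.toDecidableLT
              keys pvTupKey false with hsk
  have hperm : sk.Perm keys :=
    @PySem.List.sorted_perm _ _ List.instLinearOrder.toLT LinearOrder.toDecidableLT keys pvTupKey false
  have hsorted : sk.Pairwise (fun x y => pvTupKey x ≤ pvTupKey y) :=
    PySem.List.sorted_pairwise keys pvTupKey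
  rw [pvScanAll sk hsorted, List.toFinset_eq_of_perm _ _ hperm, pvOfListLen]
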